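-- pv_equiv track=rewrite | github.com/eren23/search_engine_reverser | search_reverser/analyzers.py | detect_matching_algorithm
-- ===== SOURCE A (Python) =====
-- from typing import Dict, List, Any
--
-- def detect_matching_algorithm(results: List[Any]) -> str:
--     """Determine the likely matching algorithm type"""
--     if not results:
--         return "unknown"
--
--     fuzzy_count = sum(1 for r in results if r.get("matched") == "fuzzy")
--     exact_count = sum(1 for r in results if r.get("matched") == "exact")
--
--     if fuzzy_count > exact_count:
--         return "fuzzy"
--     elif exact_count > 0:
--         return "exact"
--     return "unknown"
-- ===== SOURCE B (Python) =====
-- def detect_matching_algorithm(results):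
--     """Determine the likely matching algorithm type"""
--     # Single pass keeping a running margin (fuzzy minus exact) and whether
--     # any exact match was seen; fuzzy wins iff the margin ends positive.
--     margin = 0
--     exact_seen = False
--     for r in results:
--         m = r.get("matched")
--         if m == "fuzzy":
--             margin += 1
--         elif m == "exact":
--             margin -= 1
--             exact_seen = True
--     if margin > 0:
--         return "fuzzy"
--     if exact_seen:
--         return "exact"
--     return "unknown"
-- ===== Notes on version B (the rewrite author's own statement) =====
-- stated objective: alternative
-- what changed: Replaces the empty-list guard plus two separate filtered counting scans with one pass that maintains only a running margin (fuzzy minus exact) and an exact-seen flag, deciding the verdict from the sign of the margin instead of comparing two counts.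
import Mathlib
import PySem

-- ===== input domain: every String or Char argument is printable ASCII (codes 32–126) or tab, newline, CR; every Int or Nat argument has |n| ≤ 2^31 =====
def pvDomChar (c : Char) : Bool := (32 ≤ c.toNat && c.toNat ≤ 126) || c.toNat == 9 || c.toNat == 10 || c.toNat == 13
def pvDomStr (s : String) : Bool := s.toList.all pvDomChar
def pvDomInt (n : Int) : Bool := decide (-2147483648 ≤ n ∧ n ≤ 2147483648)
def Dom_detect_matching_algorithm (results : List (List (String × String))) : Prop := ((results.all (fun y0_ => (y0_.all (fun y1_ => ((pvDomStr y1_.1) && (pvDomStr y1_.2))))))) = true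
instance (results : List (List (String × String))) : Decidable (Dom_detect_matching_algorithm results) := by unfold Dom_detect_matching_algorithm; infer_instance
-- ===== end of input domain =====

-- B drops the empty guard and the two filtered counting scans for one pass keeping a running margin (fuzzy − exact) and an exact-seen flag (alternative).

-- ===== PORT A =====
def detect_matching_algorithm (results : List (List (String × String))) : String :=
  if results = [] then "unknown"
  else
    let fuzzy_count : Int :=
      results.foldl (fun acc r => if PySem.Dict.get? ⟨r⟩ "matched" == some "fuzzy" then acc + 1 else acc) 0
    let exact_count : Int :=
      results.foldl (fun acc r => if PySem.Dict.get? ⟨r⟩ "matched" == some "exact" then acc + 1 else acc) 0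
    if fuzzy_count > exact_count then "fuzzy"
    else if exact_count > 0 then "exact"
    else "unknown"

-- ===== PORT B =====
def detect_matching_algorithm_alt (results : List (List (String × String))) : String :=
  let st : Int × Bool :=
    results.foldl (fun st r =>
      let m := PySem.Dict.get? ⟨r⟩ "matched"
      if m == some "fuzzy" then (st.1 + 1, st.2)
      else if m == some "exact" then (st.1 - 1, true)
      else st) (0, false)
  if st.1 > 0 then "fuzzy"
  else if st.2 then "exact"
  else "unknown"

-- ===== PRECONDITION & SPEC =====
def Spec_detect_matching_algorithm (results : List (List (String × String))) (out : String) : Prop := out = detect_matching_algorithm_alt results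
instance (results : List (List (String × String))) (out : String) : Decidable (Spec_detect_matching_algorithm results out) := by unfold Spec_detect_matching_algorithm; infer_instance

-- ===== CLAIM (what is proved, stated in full; the proofs are below) =====
def Claim_equal_detect_matching_algorithm : Prop := ∀ (results : List (List (String × String))), Dom_detect_matching_algorithm results → Spec_detect_matching_algorithm results (detect_matching_algorithm results)

-- ===== LEMMAS AND PROOFS =====

-- A's filtered sum counts occurrences of v among the looked-up "matched" values.
theorem pv_foldl_count (results : List (List (String × String))) (v : Option String) (a : Int) :
    results.foldl (fun acc r => if PySem.Dict.get? ⟨r⟩ "matched" == v then acc + 1 else acc) a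
      = a + ((results.map (fun r => PySem.Dict.get? ⟨r⟩ "matched")).count v : Int) := by
  induction results generalizing a with
  | nil => simp
  | cons h t ih =>
    simp only [List.foldl_cons, List.map_cons]
    rw [ih]
    by_cases hv : PySem.Dict.get? ⟨h⟩ "matched" = v
    · simp [hv]; ring
    · have hb : (PySem.Dict.get? ⟨h⟩ "matched" == v) = false := by simpa using hv
      rw [List.count_cons]
      simp [hb]

-- B's fold state is (d + fuzzy-count − exact-count, b || exact-count ≠ 0).
theorem pv_fold_state (results : List (List (String × String))) (d : Int) (b : Bool) :
    results.foldl (fun st r =>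
      let m := PySem.Dict.get? ⟨r⟩ "matched"
      if m == some "fuzzy" then (st.1 + 1, st.2)
      else if m == some "exact" then (st.1 - 1, true)
      else st) (d, b)
    = (d + ((results.map (fun r => PySem.Dict.get? ⟨r⟩ "matched")).count (some "fuzzy") : Int)
         - ((results.map (fun r => PySem.Dict.get? ⟨r⟩ "matched")).count (some "exact") : Int),
       b || ((results.map (fun r => PySem.Dict.get? ⟨r⟩ "matched")).count (some "exact") != 0)) := by
  induction results generalizing d b with
  | nil => simp
  | cons h t ih =>
    simp only [List.foldl_cons, List.map_cons]
    by_cases hf : PySem.Dict.get? ⟨h⟩ "matched" = some "fuzzy"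
    · simp only [hf]
      rw [ih]
      simp
      omega
    · by_cases he : PySem.Dict.get? ⟨h⟩ "matched" = some "exact"
      · have hb : (PySem.Dict.get? ⟨h⟩ "matched" == some "fuzzy") = false := by simpa using hf
        simp only [he]
        rw [ih]
        simp [List.count_cons]
        ring
      · have hb1 : (PySem.Dict.get? ⟨h⟩ "matched" == some "fuzzy") = false := by simpa using hf
        have hb2 : (PySem.Dict.get? ⟨h⟩ "matched" == some "exact") = false := by simpa using he
        simp only [hb1, hb2]
        rw [ih]
        simp [List.count_cons, hb1, hb2]

-- ===== VERDICT (by name: the statement is the Claim_ definition above) =====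
theorem detect_matching_algorithm_spec : Claim_equal_detect_matching_algorithm := by
  intro results _
  unfold Spec_detect_matching_algorithm detect_matching_algorithm detect_matching_algorithm_alt
  rw [pv_fold_state]
  rcases results with _ | ⟨h, t⟩
  · simp
  · simp only [reduceCtorEq, ite_false]
    rw [pv_foldl_count, pv_foldl_count]
    simp only [zero_add, Bool.false_or]
    generalize ((h :: t).map (fun r => PySem.Dict.get? ⟨r⟩ "matched")).count (some "fuzzy") = nF
    generalize ((h :: t).map (fun r => PySem.Dict.get? ⟨r⟩ "matched")).count (some "exact") = nE
    by_cases h1 : (nF : Int) > (nE : Int)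
    · rw [if_pos h1, if_pos (by omega : (nF : Int) - (nE : Int) > 0)]
    · rw [if_neg h1, if_neg (by omega : ¬ ((nF : Int) - (nE : Int) > 0))]
      by_cases h3 : (nE : Int) > 0
      · have h4 : (nE != 0) = true := by simpa using (by omega : nE ≠ 0)
        rw [if_pos h3, if_pos h4]
      · have h4 : ¬ ((nE != 0) = true) := by simp; omega
        rw [if_neg h3, if_neg h4]
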